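-- pv_equiv track=rewrite | github.com/theobigdog/python_homework | DiceRoller™.py | reroll_check
-- ===== SOURCE A (Python) =====
-- def reroll_check(roll : list, reroll : list) -> bool:
--     list_length = len(reroll)
--     ok_nums = ['1','2','3','4','5']
--     check_2 = []
--     for i in range(0,list_length):
--         if reroll[i] in ok_nums:
--             if check_2.count(reroll[i]) > 0:
--                 return 0
--             else:
--                 check_2.append(reroll[i])
--
--         else:
--             return 0
--     return 1
-- ===== SOURCE B (Python) =====
-- def reroll_check(roll: list, reroll: list) -> bool:
--     ok_nums = ['1', '2', '3', '4', '5']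
--     if all(x in ok_nums for x in reroll) and len(set(reroll)) == len(reroll):
--         return 1
--     return 0
-- ===== Notes on version B (the rewrite author's own statement) =====
-- stated objective: simpler
-- what changed: Replaces the early-exiting index loop with incremental seen-list counting by two whole-list predicates: an all() membership pass and a set-cardinality duplicate test.
import Mathlib
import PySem

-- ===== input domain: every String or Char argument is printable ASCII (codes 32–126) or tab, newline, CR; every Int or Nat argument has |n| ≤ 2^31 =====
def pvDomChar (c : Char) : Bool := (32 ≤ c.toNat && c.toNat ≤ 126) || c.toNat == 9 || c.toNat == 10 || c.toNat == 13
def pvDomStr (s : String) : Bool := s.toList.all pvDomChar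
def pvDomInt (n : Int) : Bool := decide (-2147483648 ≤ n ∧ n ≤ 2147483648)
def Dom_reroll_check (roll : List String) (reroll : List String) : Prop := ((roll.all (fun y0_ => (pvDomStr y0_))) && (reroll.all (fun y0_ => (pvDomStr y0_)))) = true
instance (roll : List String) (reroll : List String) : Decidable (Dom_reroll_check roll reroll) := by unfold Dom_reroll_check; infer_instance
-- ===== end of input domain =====

-- B replaces A's early-exiting scan with a seen-list by two whole-list predicates
-- (membership pass + set-cardinality duplicate test); objective: simpler.

-- ===== PORT A =====
-- the 'for i in range(0, list_length)' loop with early returns, as structural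
-- recursion over the suffix still to scan, carrying the check_2 accumulator
def rerollLoopA (xs : List String) (check2 : List String) : Int :=
  match xs with
  | [] => 1
  | x :: rest =>
    if ["1", "2", "3", "4", "5"].contains x then
      if check2.count x > 0 then 0
      else rerollLoopA rest (check2 ++ [x])
    else 0

def reroll_check (roll : List String) (reroll : List String) : Int :=
  rerollLoopA reroll []

-- ===== PORT B =====
def reroll_check_alt (roll : List String) (reroll : List String) : Int :=
  if reroll.all (fun x => ["1", "2", "3", "4", "5"].contains x)
      && ((PySem.Set.ofList reroll).length == reroll.length) then 1 else 0

-- ===== PRECONDITION & SPEC =====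
def Spec_reroll_check (roll : List String) (reroll : List String) (out : Int) : Prop := out = reroll_check_alt roll reroll
instance (roll : List String) (reroll : List String) (out : Int) : Decidable (Spec_reroll_check roll reroll out) := by unfold Spec_reroll_check; infer_instance

-- ===== CLAIM (what is proved, stated in full; the proofs are below) =====
def Claim_equal_reroll_check : Prop := ∀ (roll : List String) (reroll : List String), Dom_reroll_check roll reroll → Spec_reroll_check roll reroll (reroll_check roll reroll)

-- ===== LEMMAS AND PROOFS =====

-- characterisation of A's loop for an arbitrary accumulator
theorem rerollLoopA_eq (xs : List String) (check2 : List String) :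
    rerollLoopA xs check2 =
      if (xs.all (fun x => ["1", "2", "3", "4", "5"].contains x))
          ∧ xs.Nodup ∧ (∀ x ∈ xs, x ∉ check2) then 1 else 0 := by
  induction xs generalizing check2 with
  | nil => simp [rerollLoopA]
  | cons x rest ih =>
    simp only [rerollLoopA]
    by_cases hok : (["1", "2", "3", "4", "5"] : List String).contains x
    · rw [if_pos hok]
      by_cases hx : x ∈ check2
      · rw [if_pos (List.count_pos_iff.mpr hx), if_neg]
        rintro ⟨-, -, hni⟩
        exact hni x List.mem_cons_self hx
      · rw [if_neg (by simp [List.count_pos_iff, hx]), ih]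
        congr 1
        rw [eq_iff_iff]
        simp only [List.all_cons, hok, Bool.true_and, List.nodup_cons, List.mem_cons,
          List.mem_append, List.not_mem_nil, or_false]
        constructor
        · rintro ⟨ha, hn, hni⟩
          refine ⟨ha, ⟨fun hm => hni x hm (Or.inr rfl), hn⟩, ?_⟩
          intro y hy
          rcases hy with rfl | hy
          · exact hx
          · exact fun hc => hni y hy (Or.inl hc)
        · rintro ⟨ha, ⟨hxr, hn⟩, hni⟩
          refine ⟨ha, hn, ?_⟩
          intro y hy hc
          rcases hc with hc | rfl
          · exact hni y (Or.inr hy) hc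
          · exact hxr hy
    · rw [if_neg hok, if_neg]
      rintro ⟨ha, -, -⟩
      rw [List.all_cons, Bool.and_eq_true] at ha
      exact hok ha.1

-- set-cardinality duplicate test: len(set(l)) == len(l) iff l has no duplicates
theorem length_ofList_eq_iff (l : List String) :
    ((PySem.Set.ofList l).length = l.length) ↔ l.Nodup := by
  induction l with
  | nil => simp [PySem.Set.ofList_nil]
  | cons x xs ih =>
    rw [PySem.Set.ofList_cons]
    by_cases hx : x ∈ xs
    · have hxs : x ∈ PySem.Set.ofList xs := by
        rw [PySem.Set.mem_ofList]; exact hx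
      constructor
      · intro h
        exfalso
        have hlt : ((PySem.Set.ofList xs).discard x).length < (PySem.Set.ofList xs).length := by
          apply List.length_filter_lt_length_iff_exists.mpr
          exact ⟨x, hxs, by simp⟩
        have hle := PySem.Set.length_ofList_le xs
        simp only [List.length_cons] at h
        omega
      · intro h; exact absurd hx (by simp [List.nodup_cons] at h; exact h.1)
    · have : (PySem.Set.ofList xs).discard x = PySem.Set.ofList xs := by
        apply List.filter_eq_self.mpr
        intro y hy
        have hyx : y ≠ x := fun h => hx (h ▸ (PySem.Set.mem_ofList xs y).mp hy)
        simp [hyx]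
      rw [this]
      simp only [List.length_cons, List.nodup_cons]
      constructor
      · intro h; exact ⟨hx, ih.mp (by omega)⟩
      · rintro ⟨-, hn⟩; rw [ih.mpr hn]

-- ===== VERDICT (by name: the statement is the Claim_ definition above) =====
theorem reroll_check_spec : Claim_equal_reroll_check := by
  intro roll reroll _
  unfold Spec_reroll_check reroll_check reroll_check_alt
  rw [rerollLoopA_eq]
  have hiff := length_ofList_eq_iff reroll
  by_cases hnd : reroll.Nodup
  · simp [hnd, hiff.mpr hnd]
  · have h2 : ¬((PySem.Set.ofList reroll).length = reroll.length) := fun h => hnd (hiff.mp h)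
    simp [hnd, h2]
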